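-- pv_equiv track=rewrite | github.com/TheRealAyush/2026-NVIDIA | team-submissions/tests.py | ref_labs_energy
-- ===== SOURCE A (Python) =====
-- def ref_labs_energy(spins):
--     # spins is a list of +/-1
--     N = len(spins)
--     E = 0
--     for k in range(1, N):
--         ck = 0
--         for i in range(N - k):
--             ck += spins[i] * spins[i + k]
--         E += ck * ck
--     return E
-- ===== SOURCE B (Python) =====
-- def ref_labs_energy(spins):
--     # Suffix dynamic programming: sweep right-to-left, maintaining the whole
--     # autocorrelation vector corr of the current suffix (corr[k-1] = c_k),
--     # then sum the squares.
--     n = len(spins)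
--     corr = []
--     for idx in range(n - 1, -1, -1):
--         x = spins[idx]
--         rest = spins[idx + 1:]
--         corr = [x * rest[k] + (corr[k] if k < len(corr) else 0)
--                 for k in range(len(rest))]
--     return sum(v * v for v in corr)
-- ===== Notes on version B (the rewrite author's own statement) =====
-- stated objective: alternative
-- what changed: Replaced the per-shift nested scans (for each lag k, rescan the list) by a single right-to-left suffix sweep that maintains the whole autocorrelation vector of the current suffix as the loop state, then sums its squares.
import Mathlib
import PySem

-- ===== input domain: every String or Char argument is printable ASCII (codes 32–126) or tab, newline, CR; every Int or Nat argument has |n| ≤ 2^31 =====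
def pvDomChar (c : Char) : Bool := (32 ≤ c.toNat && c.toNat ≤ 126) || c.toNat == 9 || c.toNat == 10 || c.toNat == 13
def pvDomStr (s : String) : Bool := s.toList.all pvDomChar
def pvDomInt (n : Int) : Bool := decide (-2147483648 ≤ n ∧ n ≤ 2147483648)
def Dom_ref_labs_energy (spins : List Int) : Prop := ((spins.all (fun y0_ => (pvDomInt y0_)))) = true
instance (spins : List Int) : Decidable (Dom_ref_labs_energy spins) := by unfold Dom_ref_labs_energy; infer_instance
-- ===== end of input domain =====

-- B replaces A's per-lag rescans by one right-to-left sweep maintaining the suffix's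
-- whole autocorrelation vector as loop state (alternative algorithm, same asymptotic cost).


-- ===== PORT A =====
-- literal port of A; all indices i, i+k lie in range, so pyGetD's default is never used
def ref_labs_energy (spins : List Int) : Int :=
  let N : Int := spins.length
  (PySem.List.pyRange 1 N 1).foldl (fun E k =>
    let ck := (PySem.List.pyRange 0 (N - k) 1).foldl
      (fun ck i => ck + PySem.List.pyGetD spins i 0 * PySem.List.pyGetD spins (i + k) 0) 0
    E + ck * ck) 0

-- ===== PORT B =====
-- literal port of Source B; rest[k] and corr[k] accesses are in range, default never used
def ref_labs_energy_alt (spins : List Int) : Int :=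
  let n : Int := spins.length
  let corr := (PySem.List.pyRange (n - 1) (-1) (-1)).foldl (fun corr idx =>
      let x := PySem.List.pyGetD spins idx 0
      let rest := PySem.List.slice spins (some (idx + 1)) none
      (PySem.List.pyRange 0 (rest.length : Int) 1).map (fun k =>
        x * PySem.List.pyGetD rest k 0 +
          (if k < (corr.length : Int) then PySem.List.pyGetD corr k 0 else 0)))
    ([] : List Int)
  corr.foldl (fun acc v => acc + v * v) 0

-- ===== PRECONDITION & SPEC =====
def Spec_ref_labs_energy (spins : List Int) (out : Int) : Prop := out = ref_labs_energy_alt spins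
instance (spins : List Int) (out : Int) : Decidable (Spec_ref_labs_energy spins out) := by unfold Spec_ref_labs_energy; infer_instance

-- ===== CLAIM (what is proved, stated in full; the proofs are below) =====
def Claim_equal_ref_labs_energy : Prop := ∀ (spins : List Int), Dom_ref_labs_energy spins → Spec_ref_labs_energy spins (ref_labs_energy spins)

-- ===== LEMMAS AND PROOFS =====

-- c_k: the lag-k autocorrelation of l
def ckSpec (l : List Int) (k : Nat) : Int := (List.zipWith (· * ·) l (l.drop k)).sum

-- the full autocorrelation vector [c_1, …, c_{n-1}]
def corrSpec (l : List Int) : List Int :=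
  (List.range (l.length - 1)).map (fun j => ckSpec l (j + 1))

lemma foldl_add_sum {α : Type} (f : α → Int) (xs : List α) (init : Int) :
    xs.foldl (fun a x => a + f x) init = init + (xs.map f).sum := by
  induction xs generalizing init with
  | nil => simp
  | cons x xs ih => simp [List.foldl_cons, ih]; ring

lemma range_map_eq_zipWith (l : List Int) (k : Nat) (hk : k ≤ l.length) :
    (List.range (l.length - k)).map (fun i => l.getD i 0 * l.getD (i + k) 0)
      = List.zipWith (· * ·) l (l.drop k) := by
  apply List.ext_getElem
  · simp
  · intro i h1 h2
    simp only [List.getElem_map, List.getElem_range, List.getElem_zipWith,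
      List.getElem_drop]
    have hi : i < l.length - k := by simpa using h1
    rw [List.getD_eq_getElem l 0 (by omega), List.getD_eq_getElem l 0 (by omega)]
    have hik : i + k = k + i := Nat.add_comm i k
    simp [hik]

lemma length_corrSpec (t : List Int) : (corrSpec t).length = t.length - 1 := by
  simp [corrSpec]

lemma corrSpec_getD (t : List Int) (k : Nat) (hk : k < t.length - 1) :
    (corrSpec t).getD k 0 = ckSpec t (k + 1) := by
  unfold corrSpec
  rw [List.getD_eq_getElem _ 0 (by simpa using hk)]
  simp

lemma ckSpec_zero_of_ge (t : List Int) (k : Nat) (hk : t.length ≤ k) : ckSpec t k = 0 := by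
  unfold ckSpec
  rw [List.drop_eq_nil_of_le hk]
  simp

-- A's inner loop computes ckSpec
lemma innerA (l : List Int) (k : Nat) (hk : k ≤ l.length) :
    (PySem.List.pyRange 0 ((l.length : Int) - (k : Int)) 1).foldl
      (fun ck i => ck + PySem.List.pyGetD l i 0 * PySem.List.pyGetD l (i + (k : Int)) 0) 0
      = ckSpec l k := by
  rw [PySem.List.pyRange_one, List.foldl_map, foldl_add_sum]
  have h1 : ((l.length : Int) - (k : Int) - 0).toNat = l.length - k := by omega
  rw [h1]
  have h2 : ∀ i : Nat,
      PySem.List.pyGetD l (0 + (i : Int)) 0 * PySem.List.pyGetD l (0 + (i : Int) + (k : Int)) 0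
        = l.getD i 0 * l.getD (i + k) 0 := by
    intro i
    have ha : (0 : Int) + (i : Int) + (k : Int) = ((i + k : Nat) : Int) := by push_cast; ring
    have hb : (0 : Int) + (i : Int) = ((i : Nat) : Int) := by ring
    rw [ha, hb, PySem.List.pyGetD_natCast, PySem.List.pyGetD_natCast]
  simp only [h2]
  rw [range_map_eq_zipWith l k hk]
  simp [ckSpec]

-- A's value is the sum of squared autocorrelations
lemma A_eq (l : List Int) :
    ref_labs_energy l = ((corrSpec l).map (fun v => v * v)).sum := by
  simp only [ref_labs_energy]
  rw [PySem.List.pyRange_one, List.foldl_map, foldl_add_sum]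
  simp only [corrSpec, List.map_map]
  have hlen : ((l.length : Int) - 1).toNat = l.length - 1 := by omega
  rw [hlen]
  rw [Int.zero_add]
  congr 1
  apply List.map_congr_left
  intro j hj
  have hj' : j < l.length - 1 := List.mem_range.mp hj
  have hcast : (1 : Int) + (j : Int) = ((j + 1 : Nat) : Int) := by push_cast; ring
  rw [hcast, innerA l (j + 1) (by omega)]
  simp

-- one step of B's sweep: consing x onto t updates the correlation vector entrywise
lemma corrSpec_cons (x : Int) (t : List Int) :
    corrSpec (x :: t)
      = (List.range t.length).map (fun k =>
          x * t.getD k 0 + (if k < t.length - 1 then (corrSpec t).getD k 0 else 0)) := by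
  conv_lhs => rw [corrSpec]
  simp only [List.length_cons, Nat.add_sub_cancel]
  apply List.map_congr_left
  intro k hk
  have hk' : k < t.length := List.mem_range.mp hk
  have hdrop : (x :: t).drop (k + 1) = t.drop k := rfl
  rw [ckSpec, hdrop, List.drop_eq_getElem_cons hk']
  simp only [List.zipWith_cons_cons, List.sum_cons]
  congr 1
  · rw [List.getD_eq_getElem t 0 hk']
  · by_cases h : k < t.length - 1
    · rw [if_pos h, corrSpec_getD t k h, ckSpec]
    · rw [if_neg h]
      have h0 := ckSpec_zero_of_ge t (k + 1) (by omega)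
      simpa [ckSpec] using h0

-- one iteration of B's loop, stated on the port's loop body
lemma B_step (l : List Int) (m : Nat) (hm : m < l.length) :
    (PySem.List.pyRange 0 (((PySem.List.slice l (some ((m : Int) + 1)) none).length : Nat) : Int) 1).map
      (fun k =>
        PySem.List.pyGetD l (m : Int) 0 *
            PySem.List.pyGetD (PySem.List.slice l (some ((m : Int) + 1)) none) k 0 +
          (if k < (((corrSpec (l.drop (m + 1))).length : Nat) : Int) then
              PySem.List.pyGetD (corrSpec (l.drop (m + 1))) k 0 else 0))
      = corrSpec (l.drop m) := by
  have hsl : PySem.List.slice l (some ((m : Int) + 1)) none = l.drop (m + 1) := by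
    have : ((m : Int) + 1) = ((m + 1 : Nat) : Int) := by push_cast; ring
    rw [this, PySem.List.slice_from_natCast]
  rw [hsl]
  have hdrop : l.drop m = l[m] :: l.drop (m + 1) := List.drop_eq_getElem_cons hm
  rw [hdrop, corrSpec_cons]
  set t := l.drop (m + 1) with ht
  rw [PySem.List.pyRange_zero_nat, List.map_map]
  apply List.map_congr_left
  intro k hk
  have hk' : k < t.length := List.mem_range.mp hk
  simp only [Function.comp_apply, PySem.List.pyGetD_natCast, length_corrSpec, Nat.cast_lt]
  rw [List.getD_eq_getElem l 0 hm]

-- B's loop invariant: folding indices m-1 … 0 from corrSpec (drop m) yields corrSpec l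
lemma B_loop (l : List Int) : ∀ m : Nat, m ≤ l.length →
    (PySem.List.pyRange ((m : Int) - 1) (-1) (-1)).foldl (fun corr idx =>
      (PySem.List.pyRange 0 (((PySem.List.slice l (some (idx + 1)) none).length : Nat) : Int) 1).map
        (fun k =>
          PySem.List.pyGetD l idx 0 *
              PySem.List.pyGetD (PySem.List.slice l (some (idx + 1)) none) k 0 +
            (if k < ((corr.length : Nat) : Int) then PySem.List.pyGetD corr k 0 else 0)))
      (corrSpec (l.drop m))
      = corrSpec l := by
  intro m
  induction m with
  | zero =>
    intro _
    rw [show ((0 : Nat) : Int) - 1 = (-1 : Int) by norm_num,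
      PySem.List.pyRange_neg_one_eq_nil (le_refl (-1 : Int))]
    simp
  | succ m ih =>
    intro h
    have hc : ((m + 1 : Nat) : Int) - 1 = (m : Int) := by push_cast; ring
    rw [hc, PySem.List.pyRange_neg_one_cons (by omega : (-1 : Int) < (m : Int)),
      List.foldl_cons, B_step l m (by omega)]
    exact ih (by omega)

lemma B_eq (l : List Int) :
    ref_labs_energy_alt l = ((corrSpec l).map (fun v => v * v)).sum := by
  simp only [ref_labs_energy_alt]
  have h := B_loop l l.length le_rfl
  rw [List.drop_length] at h
  have hc : corrSpec ([] : List Int) = [] := by simp [corrSpec]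
  rw [hc] at h
  rw [h, foldl_add_sum]
  simp

-- ===== VERDICT (by name: the statement is the Claim_ definition above) =====
theorem ref_labs_energy_spec : Claim_equal_ref_labs_energy := by
  intro spins _
  unfold Spec_ref_labs_energy
  rw [A_eq, B_eq]
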